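-- pv_equiv track=rewrite | github.com/jbfcd/test | src/_pytest/nodes.py | iterparentnodeids
-- ===== SOURCE A (Python) =====
-- from typing import Iterator
--
-- SEP = "/"
--
-- def iterparentnodeids(nodeid: str) -> Iterator[str]:
--     """Return the parent node IDs of a given node ID, inclusive.
--
--     For the node ID
--
--         "testing/code/test_excinfo.py::TestFormattedExcinfo::test_repr_source"
--
--     the result would be
--
--         ""
--         "testing"
--         "testing/code"
--         "testing/code/test_excinfo.py"
--         "testing/code/test_excinfo.py::TestFormattedExcinfo"
--         "testing/code/test_excinfo.py::TestFormattedExcinfo::test_repr_source"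
--
--     Note that / components are only considered until the first ::.
--     """
--     # todo: deprecate in favor of directory nodes
--     pos = 0
--     first_colons: int | None = nodeid.find("::")
--     if first_colons == -1:
--         first_colons = None
--     # The root Session node - always present.
--     yield ""
--     # Eagerly consume SEP parts until first colons.
--     while True:
--         at = nodeid.find(SEP, pos, first_colons)
--         if at == -1:
--             break
--         if at > 0:
--             yield nodeid[:at]
--         pos = at + len(SEP)
--     # Eagerly consume :: parts.
--     while True:
--         at = nodeid.find("::", pos)
--         if at == -1:
--             break
--         if at > 0:
--             yield nodeid[:at]
--         pos = at + len("::")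
--     # The node ID itself.
--     if nodeid:
--         yield nodeid
-- ===== SOURCE B (Python) =====
-- from typing import Iterator
--
-- SEP = "/"
--
-- def iterparentnodeids(nodeid: str) -> Iterator[str]:
--     """Single left-to-right character scan: collect all cut positions
--     (slashes before the first '::', then non-overlapping '::' starts)
--     in one pass, then emit the prefixes."""
--     yield ""
--     n = len(nodeid)
--     cuts = []
--     i = 0
--     seen_colons = False
--     while i < n:
--         if nodeid.startswith("::", i):
--             cuts.append(i)
--             seen_colons = True
--             i += 2
--         elif not seen_colons and nodeid[i] == SEP:
--             cuts.append(i)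
--             i += 1
--         else:
--             i += 1
--     for c in cuts:
--         if c > 0:
--             yield nodeid[:c]
--     if nodeid:
--         yield nodeid
-- ===== Notes on version B (the rewrite author's own statement) =====
-- stated objective: alternative
-- what changed: Replaces A's two cursor-advancing str.find loops (slash search bounded by the first '::', then a '::' search loop) by a single left-to-right character scan that collects all cut positions in one pass with a seen-colons flag, then emits the prefixes from that list.
import Mathlib
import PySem

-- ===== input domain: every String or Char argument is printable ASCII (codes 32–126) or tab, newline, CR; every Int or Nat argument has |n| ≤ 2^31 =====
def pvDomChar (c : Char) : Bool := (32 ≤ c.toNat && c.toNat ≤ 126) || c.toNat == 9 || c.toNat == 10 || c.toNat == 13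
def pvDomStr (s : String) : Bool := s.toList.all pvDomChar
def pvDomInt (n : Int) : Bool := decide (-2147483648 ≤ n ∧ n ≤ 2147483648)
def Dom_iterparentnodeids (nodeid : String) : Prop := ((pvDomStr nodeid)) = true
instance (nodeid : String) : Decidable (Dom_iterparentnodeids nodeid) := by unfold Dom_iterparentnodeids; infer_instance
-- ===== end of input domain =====

-- B replaces A's two cursor-advancing find-loops by one character scan that collects all cut
-- positions first (objective: alternative decomposition, same cost).

-- ===== PORT A =====
-- bounds of a successful Python str.find(sub, k[, end]); cited by the loops' decreasing_by
theorem pvFF_core (l sub : List Char) (hsub : sub ≠ []) (k : Nat) (E : Int)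
    (h : (if E < (k:Int) then (-1:Int)
          else if PySem.Chars.find (List.drop ((k:Int)).toNat (List.take E.toNat l)) sub = -1 then -1
          else (k:Int) + PySem.Chars.find (List.drop ((k:Int)).toNat (List.take E.toNat l)) sub) ≠ -1) :
    k ≤ (if E < (k:Int) then (-1:Int)
          else if PySem.Chars.find (List.drop ((k:Int)).toNat (List.take E.toNat l)) sub = -1 then -1
          else (k:Int) + PySem.Chars.find (List.drop ((k:Int)).toNat (List.take E.toNat l)) sub).toNat ∧
    (if E < (k:Int) then (-1:Int)
          else if PySem.Chars.find (List.drop ((k:Int)).toNat (List.take E.toNat l)) sub = -1 then -1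
          else (k:Int) + PySem.Chars.find (List.drop ((k:Int)).toNat (List.take E.toNat l)) sub).toNat + sub.length ≤ l.length := by
  set m := List.drop ((k:Int)).toNat (List.take E.toNat l) with hm
  by_cases hlt : E < (k:Int)
  · rw [if_pos hlt] at h; exact absurd rfl h
  · rw [if_neg hlt] at h ⊢
    by_cases hr : PySem.Chars.find m sub = -1
    · rw [if_pos hr] at h; exact absurd rfl h
    · rw [if_neg hr] at h ⊢
      have hr0 : 0 ≤ PySem.Chars.find m sub := by
        have := PySem.Chars.neg_one_le_find m sub; omega
      obtain ⟨hpre, -⟩ := PySem.Chars.find_spec (s := m) (sub := sub) hr0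
      have hlen : sub.length ≤ (List.drop (PySem.Chars.find m sub).toNat m).length :=
        hpre.length_le
      have hs1 : 1 ≤ sub.length := List.length_pos_of_ne_nil hsub
      have hml : m.length = min E.toNat l.length - k := by
        rw [hm]; simp only [List.length_drop, List.length_take]; omega
      simp only [List.length_drop] at hlen
      omega

theorem pvFindFrom_bounds (l sub : List Char) (hsub : sub ≠ []) (k : Nat) (e? : Option Int)
    (h : PySem.Chars.findFrom l sub (↑k) e? ≠ -1) :
    k ≤ (PySem.Chars.findFrom l sub (↑k) e?).toNat ∧
    (PySem.Chars.findFrom l sub (↑k) e?).toNat + sub.length ≤ l.length := by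
  have hk0 : ((k:Int) < 0) = False := by simp
  simp only [PySem.Chars.findFrom, hk0, if_false] at h ⊢
  exact pvFF_core l sub hsub k _ h


-- `while True: at = nodeid.find(SEP, pos, first_colons) …` of A
def pvLoopSep (l : List Char) (fc : Option Int) (pos : Nat) : List String × Nat :=
  let a := PySem.Chars.findFrom l ['/'] (↑pos) fc
  if _h : a = -1 then ([], pos)
  else
    let rest := pvLoopSep l fc (a.toNat + 1)
    ((if a > 0 then [String.ofList (l.take a.toNat)] else []) ++ rest.1, rest.2)
termination_by l.length + 1 - pos
decreasing_by
  have hb := pvFindFrom_bounds l ['/'] (by simp) pos fc _h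
  simp only [List.length_cons, List.length_nil] at hb
  omega

-- `while True: at = nodeid.find("::", pos) …` of A
def pvLoopCol (l : List Char) (pos : Nat) : List String × Nat :=
  let a := PySem.Chars.findFrom l [':', ':'] (↑pos) none
  if _h : a = -1 then ([], pos)
  else
    let rest := pvLoopCol l (a.toNat + 2)
    ((if a > 0 then [String.ofList (l.take a.toNat)] else []) ++ rest.1, rest.2)
termination_by l.length + 1 - pos
decreasing_by
  have hb := pvFindFrom_bounds l [':', ':'] (by simp) pos none _h
  simp only [List.length_cons, List.length_nil] at hb
  omega

def iterparentnodeids (nodeid : String) : List String :=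
  let l := nodeid.toList
  let fc0 := PySem.Chars.find l [':', ':']
  let firstColons : Option Int := if fc0 = -1 then none else some fc0
  let r1 := pvLoopSep l firstColons 0
  let r2 := pvLoopCol l r1.2
  [""] ++ r1.1 ++ r2.1 ++ (if l = [] then [] else [nodeid])

-- ===== PORT B =====
-- `while i < n:` character scan of B collecting the cut positions
def pvCuts (l : List Char) (i : Nat) (seen : Bool) : List Nat :=
  match l with
  | [] => []
  | c :: rest =>
    if c = ':' ∧ rest.head? = some ':' then i :: pvCuts rest.tail (i + 2) true
    else if c = '/' ∧ seen = false then i :: pvCuts rest (i + 1) false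
    else pvCuts rest (i + 1) seen
termination_by l.length
decreasing_by
  · simp only [List.length_cons]
    have : rest.tail.length = rest.length - 1 := List.length_tail
    omega
  · simp
  · simp

def iterparentnodeids_alt (nodeid : String) : List String :=
  let l := nodeid.toList
  [""] ++ (pvCuts l 0 false).filterMap
        (fun c => if 0 < c then some (String.ofList (l.take c)) else none)
      ++ (if l = [] then [] else [nodeid])

-- ===== PRECONDITION & SPEC =====
def Spec_iterparentnodeids (nodeid : String) (out : List String) : Prop := out = iterparentnodeids_alt nodeid
instance (nodeid : String) (out : List String) : Decidable (Spec_iterparentnodeids nodeid out) := by unfold Spec_iterparentnodeids; infer_instance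

-- ===== CLAIM (what is proved, stated in full; the proofs are below) =====
def Claim_equal_iterparentnodeids : Prop := ∀ (nodeid : String), Dom_iterparentnodeids nodeid → Spec_iterparentnodeids nodeid (iterparentnodeids nodeid)

-- ===== LEMMAS AND PROOFS =====

-- helper naming B's per-cut emission (proof-side only)
def pvEmit (l : List Char) : Nat → Option String :=
  fun c => if 0 < c then some (String.ofList (l.take c)) else none

theorem pv_find_nil (sub : List Char) (h : sub ≠ []) : PySem.Chars.find [] sub = -1 := by
  rw [PySem.Chars.find_eq_neg_one_iff]
  intro hinf
  exact h (List.eq_nil_of_infix_nil hinf)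

theorem pv_find_eq (m sub : List Char) (j : Nat) (hj : sub <+: m.drop j)
    (hmin : ∀ i < j, ¬ sub <+: m.drop i) : PySem.Chars.find m sub = (j : Int) := by
  have hinf : PySem.Chars.isIn sub m = true :=
    (PySem.Chars.exists_prefix_drop_iff_isIn sub m).mp ⟨j, hj⟩
  have h0 : 0 ≤ PySem.Chars.find m sub := by
    rw [PySem.Chars.find_nonneg_iff]
    exact (PySem.Chars.isIn_iff_infix sub m).mp hinf
  obtain ⟨hpre, hmin'⟩ := PySem.Chars.find_spec (s := m) (sub := sub) h0
  have : (PySem.Chars.find m sub).toNat = j := by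
    rcases Nat.lt_trichotomy (PySem.Chars.find m sub).toNat j with h | h | h
    · exact absurd hpre (hmin _ h)
    · exact h
    · exact absurd hj (hmin' j h)
  omega

theorem pv_find_cons (c : Char) (m sub : List Char) :
    PySem.Chars.find (c :: m) sub =
      if sub <+: (c :: m) then 0
      else if PySem.Chars.find m sub = -1 then -1 else 1 + PySem.Chars.find m sub := by
  by_cases hp : sub <+: (c :: m)
  · rw [if_pos hp]
    exact pv_find_eq (c :: m) sub 0 (by simpa using hp) (by omega)
  · rw [if_neg hp]
    by_cases hr : PySem.Chars.find m sub = -1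
    · rw [if_pos hr]
      rw [PySem.Chars.find_eq_neg_one_iff] at hr ⊢
      intro hinf
      obtain ⟨j, hj⟩ := (PySem.Chars.exists_prefix_drop_iff_isIn sub (c :: m)).mpr
        ((PySem.Chars.isIn_iff_infix sub (c :: m)).mpr hinf)
      match j, hj with
      | 0, hj => exact hp (by simpa using hj)
      | j+1, hj =>
        exact hr ((PySem.Chars.isIn_iff_infix sub m).mp
          ((PySem.Chars.exists_prefix_drop_iff_isIn sub m).mp ⟨j, by simpa using hj⟩))
    · rw [if_neg hr]
      have h0 : 0 ≤ PySem.Chars.find m sub := by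
        have := PySem.Chars.neg_one_le_find m sub; omega
      obtain ⟨hpre, hmin⟩ := PySem.Chars.find_spec (s := m) (sub := sub) h0
      have := pv_find_eq (c :: m) sub ((PySem.Chars.find m sub).toNat + 1)
        (by simpa using hpre)
        (by
          intro i hi
          match i, hi with
          | 0, _ => exact hp
          | i+1, hi => simpa using hmin i (by omega))
      omega

theorem pv_prefix_take_drop (l sub : List Char) (k e : Nat) (hk : k ≤ e) (_he : e ≤ l.length) :
    sub <+: (l.take e).drop k ↔ sub <+: l.drop k ∧ k + sub.length ≤ e := by
  rw [List.drop_take, List.prefix_take_iff]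
  constructor
  · rintro ⟨h1, h2⟩; exact ⟨h1, by omega⟩
  · rintro ⟨h1, h2⟩; exact ⟨h1, by omega⟩

theorem pv_none (l sub : List Char) (k : Int) :
    PySem.Chars.findFrom l sub k none = PySem.Chars.findFrom l sub k (some (l.length : Int)) := by
  have h1 : ((l.length:Int) < (l.length:Int)) = False := by simp
  have h2 : ((l.length:Int) < 0) = False := by simp
  simp only [PySem.Chars.findFrom, h1, h2, if_false]

theorem pv_step (l sub : List Char) (k e : Nat) (hk : k ≤ e) (he : e ≤ l.length) (hsub : sub ≠ []) :
    PySem.Chars.findFrom l sub (k : Int) (some (e : Int)) =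
      if k + sub.length ≤ e ∧ sub <+: l.drop k then (k : Int)
      else if k = e then -1 else PySem.Chars.findFrom l sub ((k + 1 : Nat) : Int) (some (e : Int)) := by
  have hke : ¬ ((e:Int) < (k:Int)) := by omega
  have hk0 : ¬ ((k:Int) < 0) := by omega
  have he0 : ¬ ((e:Int) < 0) := by omega
  have hne : ¬ ((l.length:Int) < (e:Int)) := by omega
  have hk10 : ¬ (((k+1:Nat):Int) < 0) := by omega
  simp only [PySem.Chars.findFrom, hk0, if_false, hne, he0, hke, hk10, Int.toNat_natCast]
  have hs1 : 1 ≤ sub.length := List.length_pos_of_ne_nil hsub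
  rcases Nat.eq_or_lt_of_le hk with heq | hlt
  · subst heq
    have hnil : List.drop k (List.take k l) = [] := by
      rw [List.drop_take]; simp
    rw [hnil, pv_find_nil sub hsub]
    have hc1 : ¬ (k + sub.length ≤ k ∧ sub <+: List.drop k l) := by
      rintro ⟨h1, -⟩; omega
    rw [if_neg hc1, if_pos rfl]
    simp
  · have hcons : List.drop k (List.take e l) = l[k]'(by omega) :: List.drop (k+1) (List.take e l) := by
      rw [List.drop_eq_getElem_cons (by simp; omega)]
      congr 1
      exact List.getElem_take
    by_cases hp : sub <+: List.drop k (List.take e l)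
    · obtain ⟨hpre, hle⟩ := (pv_prefix_take_drop l sub k e hk he).mp hp
      have hf0 : PySem.Chars.find (List.drop k (List.take e l)) sub = 0 :=
        pv_find_eq _ sub 0 (by simpa using hp) (by omega)
      rw [hf0, if_neg (by decide : ¬((0:Int) = -1)), if_pos ⟨hle, hpre⟩]
      norm_num
    · have hcnd : ¬ (k + sub.length ≤ e ∧ sub <+: List.drop k l) := by
        rintro ⟨h1, h2⟩
        exact hp ((pv_prefix_take_drop l sub k e hk he).mpr ⟨h2, h1⟩)
      have hp' : ¬ sub <+: (l[k]'(by omega) :: List.drop (k+1) (List.take e l)) := by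
        rw [← hcons]; exact hp
      rw [if_neg hcnd, if_neg (by omega : ¬ k = e),
        if_neg (by push_cast; omega : ¬ ((e:Int) < ((k+1:Nat):Int))), hcons,
        pv_find_cons, if_neg hp']
      by_cases hr : PySem.Chars.find (List.drop (k+1) (List.take e l)) sub = -1
      · simp only [hr]; norm_num
      · simp only [if_neg hr]
        rw [if_neg (by have := PySem.Chars.neg_one_le_find (List.drop (k+1) (List.take e l)) sub; omega : ¬ (1 + PySem.Chars.find (List.drop (k+1) (List.take e l)) sub = -1))]
        push_cast; ring

-- unfolding equations for pvCuts
theorem pvCuts_nil (i : Nat) (seen : Bool) : pvCuts [] i seen = [] := by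
  rw [pvCuts]

theorem pvCuts_colons (rest : List Char) (i : Nat) (seen : Bool) :
    pvCuts (':' :: ':' :: rest) i seen = i :: pvCuts rest (i + 2) true := by
  rw [pvCuts]; simp

theorem pvCuts_slash (rest : List Char) (i : Nat) :
    pvCuts ('/' :: rest) i false = i :: pvCuts rest (i + 1) false := by
  rw [pvCuts]; simp

theorem pvCuts_other (c : Char) (rest : List Char) (i : Nat) (seen : Bool)
    (h1 : ¬ (c = ':' ∧ rest.head? = some ':')) (h2 : ¬ (c = '/' ∧ seen = false)) :
    pvCuts (c :: rest) i seen = pvCuts rest (i + 1) seen := by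
  rw [pvCuts]; rw [if_neg h1, if_neg h2]

-- a '::' prefix of l.drop k, split off
theorem pv_drop_colons (l : List Char) (k : Nat) (hp : [':', ':'] <+: l.drop k) :
    l.drop k = ':' :: ':' :: l.drop (k + 2) ∧ k + 2 ≤ l.length := by
  obtain ⟨t, ht⟩ := hp
  have hlen : k + 2 ≤ l.length := by
    have := congrArg List.length ht
    simp [List.length_drop] at this
    omega
  have ht2 : l.drop (k + 2) = t := by
    have h2 : (l.drop k).drop 2 = l.drop (k + 2) := by
      rw [List.drop_drop]
    rw [← h2, ← ht]
    simp
  refine ⟨?_, hlen⟩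
  rw [ht2, ← ht]
  rfl

-- the converse: char-level evidence that '::' starts at k
theorem pv_cons_colons (l : List Char) (k : Nat) (hlt : k < l.length)
    (hc1 : l[k]'hlt = ':') (hc2 : (l.drop (k + 1)).head? = some ':') :
    k + 2 ≤ l.length ∧ [':', ':'] <+: l.drop k := by
  rw [List.head?_drop] at hc2
  have hlt2 : k + 1 < l.length := by
    by_contra hcon
    rw [List.getElem?_eq_none (by omega)] at hc2
    simp at hc2
  have hc2' : l[k+1]'hlt2 = ':' := by
    rw [List.getElem?_eq_getElem hlt2] at hc2
    simpa using hc2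
  refine ⟨by omega, ⟨l.drop (k + 2), ?_⟩⟩
  rw [List.drop_eq_getElem_cons hlt, List.drop_eq_getElem_cons hlt2, hc1, hc2']
  rfl

-- if no (fitting) '::' starts at k, one pvLoopCol step is a no-op on the emitted list
theorem pv_colSkip (l : List Char) (k : Nat) (hk : k < l.length)
    (hno : ¬ (k + 2 ≤ l.length ∧ [':', ':'] <+: l.drop k)) :
    (pvLoopCol l k).1 = (pvLoopCol l (k + 1)).1 := by
  have ha : PySem.Chars.findFrom l [':', ':'] (↑k) none
      = PySem.Chars.findFrom l [':', ':'] (↑(k + 1)) none := by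
    rw [pv_none, pv_none, pv_step l [':',':'] k l.length (by omega) le_rfl (by simp)]
    rw [if_neg (by simpa using hno), if_neg (by omega : ¬ k = l.length)]
  conv_lhs => rw [pvLoopCol]
  conv_rhs => rw [pvLoopCol]
  rw [ha]
  by_cases h : PySem.Chars.findFrom l [':', ':'] (↑(k + 1)) none = -1
  · rw [dif_pos h, dif_pos h]
  · rw [dif_neg h, dif_neg h]

-- phase 2: pvLoopCol agrees with the seen=true scan of pvCuts
theorem pv_colPhase (l : List Char) : ∀ (fuel k : Nat), l.length - k ≤ fuel → k ≤ l.length →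
    (pvLoopCol l k).1 = (pvCuts (l.drop k) k true).filterMap (pvEmit l) := by
  intro fuel
  induction fuel with
  | zero =>
    intro k hf hk
    have hk' : k = l.length := by omega
    subst hk'
    rw [pvLoopCol]
    rw [pv_none, pv_step l [':',':'] l.length l.length le_rfl le_rfl (by simp)]
    rw [if_neg (by simp), if_pos rfl]
    simp [List.drop_length, pvCuts_nil]
  | succ fuel ih =>
    intro k hf hk
    by_cases hcol : k + 2 ≤ l.length ∧ [':', ':'] <+: l.drop k
    · obtain ⟨hd, -⟩ := pv_drop_colons l k hcol.2
      have ha : PySem.Chars.findFrom l [':', ':'] (↑k) none = (k : Int) := by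
        rw [pv_none, pv_step l [':',':'] k l.length (by omega) le_rfl (by simp)]
        rw [if_pos (by simpa using hcol)]
      rw [pvLoopCol, ha]
      rw [dif_neg (by omega : ¬ (k : Int) = -1)]
      rw [hd, pvCuts_colons, List.filterMap_cons]
      have hrec := ih (k + 2) (by omega) (by omega)
      simp only [Int.toNat_natCast]
      rw [hrec]
      by_cases h0 : 0 < k
      · simp [pvEmit, h0]
      · have hk0 : k = 0 := by omega
        subst hk0
        simp [pvEmit]
    · rcases Nat.eq_or_lt_of_le hk with heq | hlt
      · subst heq
        rw [pvLoopCol]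
        rw [pv_none, pv_step l [':',':'] l.length l.length le_rfl le_rfl (by simp)]
        rw [if_neg (by simp), if_pos rfl]
        simp [List.drop_length, pvCuts_nil]
      · have hd : l.drop k = l[k]'hlt :: l.drop (k + 1) := List.drop_eq_getElem_cons hlt
        have h1 : ¬ (l[k]'hlt = ':' ∧ (l.drop (k + 1)).head? = some ':') := by
          rintro ⟨hc1, hc2⟩
          exact hcol (pv_cons_colons l k hlt hc1 hc2)
        have h2 : ¬ (l[k]'hlt = '/' ∧ (true : Bool) = false) := by
          rintro ⟨-, hcc⟩
          exact Bool.noConfusion hcc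
        rw [pv_colSkip l k hlt hcol, hd, pvCuts_other _ _ _ _ h1 h2]
        exact ih (k + 1) (by omega) (by omega)

-- if no '/' and no '::' starts at k (k below the bound), one pvLoopSep step is a no-op
theorem pv_sepSkip (l : List Char) (fcOpt : Option Int) (fcN : Nat)
    (heq : ∀ j : Nat, PySem.Chars.findFrom l ['/'] (↑j) fcOpt
      = PySem.Chars.findFrom l ['/'] (↑j) (some (fcN : Int)))
    (hfn : fcN ≤ l.length) (k : Nat) (hk : k < fcN)
    (hnos : ¬ ['/'] <+: l.drop k)
    (hnoc : ¬ (k + 2 ≤ l.length ∧ [':', ':'] <+: l.drop k)) :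
    (pvLoopSep l fcOpt k).1 ++ (pvLoopCol l (pvLoopSep l fcOpt k).2).1
      = (pvLoopSep l fcOpt (k + 1)).1 ++ (pvLoopCol l (pvLoopSep l fcOpt (k + 1)).2).1 := by
  have ha : PySem.Chars.findFrom l ['/'] (↑k) fcOpt
      = PySem.Chars.findFrom l ['/'] (↑(k + 1)) fcOpt := by
    rw [heq k, heq (k + 1), pv_step l ['/'] k fcN (by omega) hfn (by simp)]
    rw [if_neg (by rintro ⟨-, hpp⟩; exact hnos hpp), if_neg (by omega : ¬ k = fcN)]
  by_cases h : PySem.Chars.findFrom l ['/'] (↑(k + 1)) fcOpt = -1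
  · conv_lhs => rw [pvLoopSep]
    conv_rhs => rw [pvLoopSep]
    rw [ha, dif_pos h, dif_pos h]
    simp only [List.nil_append]
    exact pv_colSkip l k (by omega) hnoc
  · conv_lhs => rw [pvLoopSep]
    conv_rhs => rw [pvLoopSep]
    rw [ha, dif_neg h, dif_neg h]

-- phase 1: pvLoopSep chained into pvLoopCol agrees with the seen=false scan of pvCuts
-- a single-character prefix of l.drop k, split off
theorem pv_drop_one (l : List Char) (k : Nat) (c : Char) (hp : [c] <+: l.drop k) :
    l.drop k = c :: l.drop (k + 1) ∧ k < l.length := by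
  obtain ⟨t, ht⟩ := hp
  have hlen : k + 1 ≤ l.length := by
    have := congrArg List.length ht
    simp [List.length_drop] at this
    omega
  have ht2 : l.drop (k + 1) = t := by
    have h2 : (l.drop k).drop 1 = l.drop (k + 1) := by
      rw [List.drop_drop]
    rw [← h2, ← ht]
    simp
  exact ⟨by rw [ht2, ← ht]; rfl, by omega⟩

-- the terminal state of the slash loop: pos has reached the bound
theorem pv_sepTerm (l : List Char) (fcOpt : Option Int) (fcN : Nat)
    (heq : ∀ j : Nat, PySem.Chars.findFrom l ['/'] (↑j) fcOpt
      = PySem.Chars.findFrom l ['/'] (↑j) (some (fcN : Int)))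
    (hfn : fcN ≤ l.length)
    (hat : fcN = l.length ∨ [':', ':'] <+: l.drop fcN) :
    (pvLoopSep l fcOpt fcN).1 ++ (pvLoopCol l (pvLoopSep l fcOpt fcN).2).1
      = (pvCuts (l.drop fcN) fcN false).filterMap (pvEmit l) := by
  have hsep : pvLoopSep l fcOpt fcN = ([], fcN) := by
    have ha : PySem.Chars.findFrom l ['/'] (↑fcN) fcOpt = -1 := by
      rw [heq fcN, pv_step l ['/'] fcN fcN le_rfl hfn (by simp)]
      rw [if_neg (by rintro ⟨h1, -⟩; simp only [List.length_cons, List.length_nil] at h1; omega), if_pos rfl]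
    rw [pvLoopSep, dif_pos ha]
  rw [hsep]
  simp only [List.nil_append]
  rcases hat with hend | hcolon
  · subst hend
    have hcol : pvLoopCol l l.length = ([], l.length) := by
      have ha2 : PySem.Chars.findFrom l [':', ':'] (↑l.length) none = -1 := by
        rw [pv_none, pv_step l [':',':'] l.length l.length le_rfl le_rfl (by simp)]
        rw [if_neg (by rintro ⟨h1, -⟩; simp only [List.length_cons, List.length_nil] at h1; omega), if_pos rfl]
      rw [pvLoopCol, dif_pos ha2]
    rw [hcol]
    simp [List.drop_length, pvCuts_nil]
  · obtain ⟨hd, hlen⟩ := pv_drop_colons l fcN hcolon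
    rw [pv_colPhase l l.length fcN (by omega) (by omega), hd, pvCuts_colons, pvCuts_colons]

-- phase 1: pvLoopSep chained into pvLoopCol agrees with the seen=false scan of pvCuts
theorem pv_sepPhase (l : List Char) (fcOpt : Option Int) (fcN : Nat)
    (heq : ∀ j : Nat, PySem.Chars.findFrom l ['/'] (↑j) fcOpt
      = PySem.Chars.findFrom l ['/'] (↑j) (some (fcN : Int)))
    (hfn : fcN ≤ l.length)
    (hmin : ∀ i < fcN, ¬ [':', ':'] <+: l.drop i)
    (hat : fcN = l.length ∨ [':', ':'] <+: l.drop fcN) :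
    ∀ (fuel k : Nat), fcN - k ≤ fuel → k ≤ fcN →
    (pvLoopSep l fcOpt k).1 ++ (pvLoopCol l (pvLoopSep l fcOpt k).2).1
      = (pvCuts (l.drop k) k false).filterMap (pvEmit l) := by
  intro fuel
  induction fuel with
  | zero =>
    intro k hf hk
    have hk' : k = fcN := by omega
    subst hk'
    exact pv_sepTerm l fcOpt k heq hfn hat
  | succ fuel ih =>
    intro k hf hk
    rcases Nat.eq_or_lt_of_le hk with heqk | hlt
    · subst heqk
      exact pv_sepTerm l fcOpt k heq hfn hat
    · by_cases hs : ['/'] <+: l.drop k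
      · obtain ⟨hd, hkl⟩ := pv_drop_one l k '/' hs
        have ha : PySem.Chars.findFrom l ['/'] (↑k) fcOpt = (k : Int) := by
          rw [heq k, pv_step l ['/'] k fcN (by omega) hfn (by simp)]
          rw [if_pos ⟨by simp; omega, hs⟩]
        conv_lhs => rw [pvLoopSep]
        rw [ha, dif_neg (by omega : ¬ ((k : Int)) = -1)]
        simp only [Int.toNat_natCast, List.append_assoc]
        rw [hd, pvCuts_slash, List.filterMap_cons]
        rw [← ih (k + 1) (by omega) (by omega)]
        by_cases h0 : 0 < k
        · simp [pvEmit, h0]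
        · have hk0 : k = 0 := by omega
          subst hk0
          simp [pvEmit]
      · have hnoc : ¬ (k + 2 ≤ l.length ∧ [':', ':'] <+: l.drop k) := by
          rintro ⟨-, hpp⟩
          exact hmin k hlt hpp
        have hkl : k < l.length := by omega
        have hd : l.drop k = l[k]'hkl :: l.drop (k + 1) := List.drop_eq_getElem_cons hkl
        have h1 : ¬ (l[k]'hkl = ':' ∧ (l.drop (k + 1)).head? = some ':') := by
          rintro ⟨hc1, hc2⟩
          exact hnoc (pv_cons_colons l k hkl hc1 hc2)
        have h2 : ¬ (l[k]'hkl = '/' ∧ (false : Bool) = false) := by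
          rintro ⟨hcc, -⟩
          exact hs (by rw [hd, hcc]; exact ⟨l.drop (k + 1), rfl⟩)
        rw [pv_sepSkip l fcOpt fcN heq hfn k hlt hs hnoc, hd,
          pvCuts_other _ _ _ _ h1 h2]
        exact ih (k + 1) (by omega) (by omega)

-- ===== VERDICT (by name: the statement is the Claim_ definition above) =====
theorem iterparentnodeids_spec : Claim_equal_iterparentnodeids := by
  unfold Claim_equal_iterparentnodeids
  intro nodeid _
  unfold Spec_iterparentnodeids
  simp only [iterparentnodeids, iterparentnodeids_alt]
  have hemit : (fun c => if 0 < c then some (String.ofList (nodeid.toList.take c)) else none)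
      = pvEmit nodeid.toList := rfl
  rw [hemit]
  by_cases hfc : PySem.Chars.find nodeid.toList [':', ':'] = -1
  · rw [if_pos hfc]
    have hmin : ∀ i < nodeid.toList.length, ¬ [':', ':'] <+: nodeid.toList.drop i := by
      intro i _ hpp
      rw [PySem.Chars.find_eq_neg_one_iff] at hfc
      exact hfc ((PySem.Chars.isIn_iff_infix _ _).mp
        ((PySem.Chars.exists_prefix_drop_iff_isIn _ _).mp ⟨i, hpp⟩))
    have key := pv_sepPhase nodeid.toList none nodeid.toList.length
      (fun j => pv_none nodeid.toList ['/'] (↑j)) le_rfl hmin (Or.inl rfl)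
      nodeid.toList.length 0 (by omega) (by omega)
    rw [List.drop_zero] at key
    have keyT : ∀ T : List String,
        (pvLoopSep nodeid.toList none 0).1 ++
          ((pvLoopCol nodeid.toList (pvLoopSep nodeid.toList none 0).2).1 ++ T)
        = (pvCuts nodeid.toList 0 false).filterMap (pvEmit nodeid.toList) ++ T := by
      intro T
      rw [← List.append_assoc, key]
    simp only [List.append_assoc]
    rw [keyT]
  · rw [if_neg hfc]
    have h0 : 0 ≤ PySem.Chars.find nodeid.toList [':', ':'] := by
      have := PySem.Chars.neg_one_le_find nodeid.toList [':', ':']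
      omega
    obtain ⟨hpre, hmin⟩ := PySem.Chars.find_spec (s := nodeid.toList) (sub := [':', ':']) h0
    have hfn : (PySem.Chars.find nodeid.toList [':', ':']).toNat ≤ nodeid.toList.length := by
      have := PySem.Chars.find_le_length nodeid.toList [':', ':']
      omega
    have heq : ∀ j : Nat, PySem.Chars.findFrom nodeid.toList ['/'] (↑j)
        (some (PySem.Chars.find nodeid.toList [':', ':']))
        = PySem.Chars.findFrom nodeid.toList ['/'] (↑j)
          (some ((PySem.Chars.find nodeid.toList [':', ':']).toNat : Int)) := by
      intro j
      rw [Int.toNat_of_nonneg h0]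
    have key := pv_sepPhase nodeid.toList (some (PySem.Chars.find nodeid.toList [':', ':']))
      (PySem.Chars.find nodeid.toList [':', ':']).toNat heq hfn hmin (Or.inr hpre)
      (PySem.Chars.find nodeid.toList [':', ':']).toNat 0 (by omega) (by omega)
    rw [List.drop_zero] at key
    have keyT : ∀ T : List String,
        (pvLoopSep nodeid.toList (some (PySem.Chars.find nodeid.toList [':', ':'])) 0).1 ++
          ((pvLoopCol nodeid.toList
            (pvLoopSep nodeid.toList (some (PySem.Chars.find nodeid.toList [':', ':'])) 0).2).1 ++ T)
        = (pvCuts nodeid.toList 0 false).filterMap (pvEmit nodeid.toList) ++ T := by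
      intro T
      rw [← List.append_assoc, key]
    simp only [List.append_assoc]
    rw [keyT]
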